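-- pv_equiv track=rewrite | github.com/jdpatt/AoC | day_14.py | pick_new_recipe
-- ===== SOURCE A (Python) =====
-- from itertools import cycle
--
-- def pick_new_recipe(score_index, scoreboard):
--     """Pick the new recipe by adding 1 and the score of their current recipe"""
--     scores = cycle(enumerate(scoreboard))
--     score = next(scores)
--     for _ in range(score_index):
--         score = next(scores)
--     move = int(score[1]) + 1
--     for _ in range(move):
--         score = next(scores)
--     return score[0]
-- ===== SOURCE B (Python) =====
-- def pick_new_recipe(score_index, scoreboard):
--     """Pick the new recipe by adding 1 and the score of their current recipe"""
--     n = len(scoreboard)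
--     return (score_index + int(scoreboard[score_index % n]) + 1) % n
-- ===== Notes on version B (the rewrite author's own statement) =====
-- stated objective: simpler
-- what changed: Replaces A's element-by-element walk around cycle(enumerate(scoreboard)) with one modular-arithmetic expression (O(1) instead of a walk, though a timing run did not credit a speed-up); Pre_ excludes the empty scoreboard (A raises StopIteration) and negative score_index, a corner outside an index's natural domain where A's range() no-op (treat as position 0) and B's Python negative-mod wraparound are both defensible readings.
-- intended difference: When the score at the current position is negative (score+1 not a multiple of len(scoreboard)), A's range(score+1) silently iterates zero times so A returns the current position unchanged, while B advances by score+1 modulo the board length, the intended cyclic-advance reading of the recipe rule. — e.g. on pick_new_recipe(0, [-2, 5]): A returns 0, B returns 1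
-- outside the precondition, e.g. on pick_new_recipe(-1, [3, 5]): A returns 0, B returns 1; on pick_new_recipe(0, []): A raises StopIteration, B raises ZeroDivisionError
import Mathlib
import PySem

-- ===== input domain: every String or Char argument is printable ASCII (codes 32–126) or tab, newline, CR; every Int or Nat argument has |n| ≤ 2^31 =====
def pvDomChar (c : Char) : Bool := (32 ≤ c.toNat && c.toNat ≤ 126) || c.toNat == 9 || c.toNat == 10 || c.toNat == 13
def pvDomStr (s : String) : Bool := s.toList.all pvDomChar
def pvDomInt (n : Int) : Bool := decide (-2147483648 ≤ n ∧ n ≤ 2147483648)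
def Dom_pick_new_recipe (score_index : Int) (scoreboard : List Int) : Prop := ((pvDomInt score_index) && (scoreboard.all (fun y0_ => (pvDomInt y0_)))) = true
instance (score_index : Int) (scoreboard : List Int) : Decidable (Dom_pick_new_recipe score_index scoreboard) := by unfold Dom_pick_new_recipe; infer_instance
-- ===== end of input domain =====

-- B replaces A's step-by-step walk around the cyclic scoreboard by one modular-arithmetic
-- expression; on a negative score at the current position B advances modularly where A
-- stays put (stated as D_ below).

-- ===== PORT A =====
-- A walks cycle(enumerate(scoreboard)) one next() at a time; we model the cycle by the
-- current position p (a Nat < n), each next() being p ↦ (p+1) % n over the enumerate list.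
def pick_new_recipe (score_index : Int) (scoreboard : List Int) : Int :=
  let pairs := PySem.List.enumerate scoreboard
  let n := pairs.length
  -- score = next(scores): the first pair, position 0 (on [] Python raises StopIteration; Pre_ excludes it)
  let p1 := (PySem.List.pyRange 0 score_index 1).foldl (fun p _ => (p + 1) % n) 0
  let score := pairs.getD p1 (0, 0)
  let move := score.2 + 1
  let p2 := (PySem.List.pyRange 0 move 1).foldl (fun p _ => (p + 1) % n) p1
  (pairs.getD p2 (0, 0)).1

-- ===== PORT B =====
def pick_new_recipe_alt (score_index : Int) (scoreboard : List Int) : Int :=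
  let n : Int := scoreboard.length
  PySem.Int.mod (score_index + PySem.List.pyGetD scoreboard (PySem.Int.mod score_index n) 0 + 1) n

-- ===== PRECONDITION & SPEC =====
-- On scoreboard = [] Python A raises StopIteration (next on an empty cycle); a negative
-- score_index lies outside an index's natural domain and is a corner where A's behaviour
-- (range() no-op, i.e. treat it as position 0) and B's (Python's negative-mod wraparound)
-- are both defensible, so it is excluded.
def Pre_pick_new_recipe (score_index : Int) (scoreboard : List Int) : Prop :=
  scoreboard ≠ [] ∧ 0 ≤ score_index
instance (score_index : Int) (scoreboard : List Int) : Decidable (Pre_pick_new_recipe score_index scoreboard) := by unfold Pre_pick_new_recipe; infer_instance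
def pvWitness_pick_new_recipe : Int × List Int := (5, [3, 7, 1, 0])

-- When the score s at the current position is negative and s+1 is not a multiple of
-- len(scoreboard), A's range(s+1) silently iterates zero times so A returns the current
-- position unchanged, while B advances by s+1 modulo the board length, the intended
-- cyclic-advance reading of the recipe rule.
def D_pick_new_recipe (score_index : Int) (scoreboard : List Int) : Prop :=
  scoreboard ≠ [] ∧ 0 ≤ score_index ∧
  PySem.List.pyGetD scoreboard (PySem.Int.mod score_index (scoreboard.length : Int)) 0 < 0 ∧
  PySem.Int.mod (PySem.List.pyGetD scoreboard (PySem.Int.mod score_index (scoreboard.length : Int)) 0 + 1) (scoreboard.length : Int) ≠ 0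
instance (score_index : Int) (scoreboard : List Int) : Decidable (D_pick_new_recipe score_index scoreboard) := by unfold D_pick_new_recipe; infer_instance

def Spec_pick_new_recipe (score_index : Int) (scoreboard : List Int) (out : Int) : Prop := ¬ D_pick_new_recipe score_index scoreboard → out = pick_new_recipe_alt score_index scoreboard
instance (score_index : Int) (scoreboard : List Int) (out : Int) : Decidable (Spec_pick_new_recipe score_index scoreboard out) := by unfold Spec_pick_new_recipe; infer_instance

def pvDiffWitness_pick_new_recipe : Int × List Int := (0, [-2, 5])
def pvDiffWitnessOut_pick_new_recipe : Int × Int := (0, 1)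

-- ===== CLAIM (what is proved, stated in full; the proofs are below) =====
def Claim_unchanged_pick_new_recipe : Prop := ∀ (score_index : Int) (scoreboard : List Int), Dom_pick_new_recipe score_index scoreboard → Pre_pick_new_recipe score_index scoreboard → Spec_pick_new_recipe score_index scoreboard (pick_new_recipe score_index scoreboard)
def Claim_changed_pick_new_recipe : Prop := Dom_pick_new_recipe (pvDiffWitness_pick_new_recipe.1) (pvDiffWitness_pick_new_recipe.2) ∧ Pre_pick_new_recipe (pvDiffWitness_pick_new_recipe.1) (pvDiffWitness_pick_new_recipe.2) ∧ D_pick_new_recipe (pvDiffWitness_pick_new_recipe.1) (pvDiffWitness_pick_new_recipe.2) ∧ pick_new_recipe (pvDiffWitness_pick_new_recipe.1) (pvDiffWitness_pick_new_recipe.2) = pvDiffWitnessOut_pick_new_recipe.1 ∧ pick_new_recipe_alt (pvDiffWitness_pick_new_recipe.1) (pvDiffWitness_pick_new_recipe.2) = pvDiffWitnessOut_pick_new_recipe.2 ∧ pvDiffWitnessOut_pick_new_recipe.1 ≠ pvDiffWitnessOut_pick_new_recipe.2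
def Claim_exact_pick_new_recipe : Prop := ∀ (score_index : Int) (scoreboard : List Int), Dom_pick_new_recipe score_index scoreboard → Pre_pick_new_recipe score_index scoreboard → D_pick_new_recipe score_index scoreboard → pick_new_recipe score_index scoreboard ≠ pick_new_recipe_alt score_index scoreboard

-- ===== LEMMAS AND PROOFS =====

-- advancing a cycle of length n by one step per list element
theorem foldl_cycle_step {α : Type} (l : List α) (n : Nat) (hn : 0 < n) :
    ∀ p : Nat, p < n → l.foldl (fun p _ => (p + 1) % n) p = (p + l.length) % n := by
  induction l with
  | nil => intro p hp; simp [Nat.mod_eq_of_lt hp]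
  | cons x xs ih =>
      intro p hp
      simp only [List.foldl_cons, List.length_cons]
      rw [ih ((p + 1) % n) (Nat.mod_lt _ hn), Nat.mod_add_mod]
      congr 1
      omega

-- A's value on the natural domain: the landing position as a Nat computation
theorem pick_new_recipe_val (score_index : Int) (scoreboard : List Int)
    (h : scoreboard ≠ []) (hsi : 0 ≤ score_index) :
    pick_new_recipe score_index scoreboard =
      (((score_index.toNat % scoreboard.length +
          (PySem.List.pyGetD scoreboard
            (PySem.Int.mod score_index (scoreboard.length : Int)) 0 + 1).toNat)
        % scoreboard.length : Nat) : Int) := by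
  have hn : 0 < scoreboard.length := List.length_pos_iff.mpr h
  unfold pick_new_recipe
  simp only [PySem.List.length_enumerate]
  set n := scoreboard.length with hn_def
  rw [foldl_cycle_step _ n hn 0 hn]
  set k1 : Nat := (0 + (PySem.List.pyRange 0 score_index 1).length) % n with hk1
  have hk1lt : k1 < n := Nat.mod_lt _ hn
  have hget1 : (PySem.List.enumerate scoreboard).getD k1 (0, 0) = ((k1 : Int), scoreboard[k1]) := by
    rw [List.getD_eq_getElem _ _ (by simpa using hk1lt)]
    simp [PySem.List.getElem_enumerate]
  rw [hget1]
  rw [foldl_cycle_step _ n hn k1 hk1lt]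
  set k2 : Nat := (k1 + (PySem.List.pyRange 0 (scoreboard[k1] + 1) 1).length) % n with hk2
  have hk2lt : k2 < n := Nat.mod_lt _ hn
  have hget2 : (PySem.List.enumerate scoreboard).getD k2 (0, 0) = ((k2 : Int), scoreboard[k2]) := by
    rw [List.getD_eq_getElem _ _ (by simpa using hk2lt)]
    simp [PySem.List.getElem_enumerate]
  rw [hget2]
  have hlen1 : (PySem.List.pyRange 0 score_index 1).length = score_index.toNat := by
    rw [PySem.List.length_pyRange_one]; omega
  have hk1' : k1 = score_index.toNat % n := by rw [hk1, hlen1]; simp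
  have hi : PySem.Int.mod score_index (n : Int) = (k1 : Int) := by
    rw [show score_index = ((score_index.toNat : Nat) : Int) by omega, PySem.Int.mod_natCast, hk1']
  have hB : PySem.List.pyGetD scoreboard (PySem.Int.mod score_index (n : Int)) 0
      = scoreboard[k1] := by
    rw [hi, PySem.List.pyGetD_natCast]
    exact List.getD_eq_getElem _ _ hk1lt
  have hlen2 : (PySem.List.pyRange 0 (scoreboard[k1] + 1) 1).length
      = (scoreboard[k1] + 1).toNat := by
    rw [PySem.List.length_pyRange_one]; omega
  show (k2 : Int) = _
  rw [hk2, hlen2, ← hB, hk1']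

-- B's value on the natural domain, as an emod
theorem pick_new_recipe_alt_val (score_index : Int) (scoreboard : List Int)
    (h : scoreboard ≠ []) :
    pick_new_recipe_alt score_index scoreboard =
      (score_index + PySem.List.pyGetD scoreboard
        (PySem.Int.mod score_index (scoreboard.length : Int)) 0 + 1) % (scoreboard.length : Int) := by
  have hn : 0 < scoreboard.length := List.length_pos_iff.mpr h
  have h0 : pick_new_recipe_alt score_index scoreboard
      = PySem.Int.mod (score_index + PySem.List.pyGetD scoreboard
          (PySem.Int.mod score_index (scoreboard.length : Int)) 0 + 1) (scoreboard.length : Int) := rfl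
  rw [h0, PySem.Int.mod_eq_emod_of_pos (by exact_mod_cast hn)]

-- congruence of A's position index with score_index
theorem si_emod (score_index : Int) (n : Nat) (hn : 0 < n) (hsi : 0 ≤ score_index) :
    score_index % (n : Int) = ((score_index.toNat % n : Nat) : Int) := by
  rw [show score_index = ((score_index.toNat : Nat) : Int) by omega]
  push_cast
  rfl

theorem agree_outside (score_index : Int) (scoreboard : List Int)
    (h : scoreboard ≠ []) (hsi : 0 ≤ score_index)
    (hnd : ¬ D_pick_new_recipe score_index scoreboard) :
    pick_new_recipe score_index scoreboard = pick_new_recipe_alt score_index scoreboard := by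
  have hn : 0 < scoreboard.length := List.length_pos_iff.mpr h
  rw [pick_new_recipe_val _ _ h hsi, pick_new_recipe_alt_val _ _ h]
  set n := scoreboard.length with hn_def
  set s := PySem.List.pyGetD scoreboard (PySem.Int.mod score_index (n : Int)) 0 with hs_def
  have hsim : score_index % (n : Int) = ((score_index.toNat % n : Nat) : Int) :=
    si_emod score_index n hn hsi
  -- ¬D with the natural-domain facts means s ≥ 0 or n ∣ s + 1
  have hcase : 0 ≤ s ∨ ((n : Int)) ∣ (s + 1) := by
    rcases lt_or_ge s 0 with hneg | hpos
    · right
      by_contra hdvd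
      exact hnd ⟨h, hsi, hneg,
        fun hz => hdvd ((PySem.Int.mod_eq_zero_iff_dvd _ _).mp hz)⟩
    · left; exact hpos
  have hone : ∀ t : Int, 0 ≤ t + 1 →
      (((score_index.toNat % n + (t + 1).toNat) % n : Nat) : Int)
        = (score_index + t + 1) % (n : Int) := by
    intro t ht
    have hcast : ((t + 1).toNat : Int) = t + 1 := by omega
    push_cast [hcast]
    rw [Int.emod_add_emod, show ((score_index.toNat : Int)) = score_index by omega]
    congr 1
    ring
  rcases hcase with hpos | hdvd
  · exact hone s (by omega)
  · rcases le_or_gt 0 (s + 1) with hge | hlt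
    · exact hone s hge
    · obtain ⟨c, hc⟩ := hdvd
      have hz : (s + 1).toNat = 0 := by omega
      rw [hz, Nat.add_zero, Nat.mod_mod_of_dvd _ dvd_rfl]
      have h2 : score_index + s + 1 = score_index + (n : Int) * c := by omega
      rw [h2, Int.add_mul_emod_self_left, hsim]

theorem differ_inside (score_index : Int) (scoreboard : List Int)
    (h : scoreboard ≠ []) (hsi : 0 ≤ score_index)
    (hd : D_pick_new_recipe score_index scoreboard) :
    pick_new_recipe score_index scoreboard ≠ pick_new_recipe_alt score_index scoreboard := by
  have hn : 0 < scoreboard.length := List.length_pos_iff.mpr h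
  rw [pick_new_recipe_val _ _ h hsi, pick_new_recipe_alt_val _ _ h]
  set n := scoreboard.length with hn_def
  set s := PySem.List.pyGetD scoreboard (PySem.Int.mod score_index (n : Int)) 0 with hs_def
  obtain ⟨-, -, hneg, hndvd⟩ := hd
  have hndvd' : ¬ ((n : Int)) ∣ (s + 1) :=
    fun hdvd => hndvd ((PySem.Int.mod_eq_zero_iff_dvd _ _).mpr hdvd)
  have hsim : score_index % (n : Int) = ((score_index.toNat % n : Nat) : Int) :=
    si_emod score_index n hn hsi
  have hz : (s + 1).toNat = 0 := by
    have : s < 0 := hneg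
    omega
  rw [hz, Nat.add_zero, Nat.mod_mod_of_dvd _ dvd_rfl]
  intro heq
  apply hndvd'
  set i : Int := ((score_index.toNat % n : Nat) : Int) with hi_def
  have hilt : i < (n : Int) := by rw [hi_def]; exact_mod_cast Nat.mod_lt score_index.toNat hn
  have hige : (0 : Int) ≤ i := by positivity
  have him : i % (n : Int) = i := Int.emod_eq_of_lt hige hilt
  have e1 : (score_index + s + 1) % (n : Int) = (i + (s + 1)) % (n : Int) := by
    rw [show score_index + s + 1 = score_index + (s + 1) by ring, ← Int.emod_add_emod, hsim]
  have hmeq : Int.ModEq (n : Int) (i + (s + 1)) i := by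
    show (i + (s + 1)) % (n : Int) = i % (n : Int)
    rw [him, ← e1, ← heq]
  have hdd : ((n : Int)) ∣ i - (i + (s + 1)) := hmeq.dvd
  have h3 : i - (i + (s + 1)) = -(s + 1) := by ring
  rw [h3] at hdd
  exact dvd_neg.mp hdd

-- ===== VERDICT (by name: the statement is the Claim_ definition above) =====
theorem pick_new_recipe_spec : Claim_unchanged_pick_new_recipe := by
  intro score_index scoreboard _ hpre
  unfold Spec_pick_new_recipe
  intro hnd
  exact agree_outside score_index scoreboard hpre.1 hpre.2 hnd

theorem pick_new_recipe_changed : Claim_changed_pick_new_recipe := by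
  unfold Claim_changed_pick_new_recipe; decide

theorem pick_new_recipe_tight : Claim_exact_pick_new_recipe := by
  intro score_index scoreboard _ hpre hd
  exact differ_inside score_index scoreboard hpre.1 hpre.2 hd
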